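-- pv_equiv track=rewrite | github.com/prophet-zsy/NAS-Project | tmp.py | _recode
-- ===== SOURCE A (Python) =====
-- def _recode(graph_full, cell_list, repeat_num):
--     new_graph = [] + graph_full
--     new_cell_list = [] + cell_list
--     add = 0
--     for i in range(repeat_num - 1):
--         new_cell_list += cell_list
--         add += len(graph_full)
--         for sub_list in graph_full:
--             new_graph.append([x + add for x in sub_list])
--     return new_graph, new_cell_list
-- ===== SOURCE B (Python) =====
-- def _recode(graph_full, cell_list, repeat_num):
--     if repeat_num <= 1:
--         return list(graph_full), list(cell_list)
--     half_graph, half_cells = _recode(graph_full, cell_list, repeat_num // 2)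
--     offset = len(graph_full) * (repeat_num // 2)
--     graph = half_graph + [[x + offset for x in row] for row in half_graph]
--     cells = half_cells + half_cells
--     if repeat_num % 2:
--         last = len(graph_full) * (repeat_num - 1)
--         graph += [[x + last for x in row] for row in graph_full]
--         cells += cell_list
--     return graph, cells
-- ===== Notes on version B (the rewrite author's own statement) =====
-- stated objective: alternative
-- what changed: Replaces A's linear loop with a threaded add-offset accumulator by divide-and-conquer doubling: recursively build the result for repeat_num//2 copies, concatenate it with a shifted copy of itself, and append one extra shifted base copy when repeat_num is odd.
import Mathlib
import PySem

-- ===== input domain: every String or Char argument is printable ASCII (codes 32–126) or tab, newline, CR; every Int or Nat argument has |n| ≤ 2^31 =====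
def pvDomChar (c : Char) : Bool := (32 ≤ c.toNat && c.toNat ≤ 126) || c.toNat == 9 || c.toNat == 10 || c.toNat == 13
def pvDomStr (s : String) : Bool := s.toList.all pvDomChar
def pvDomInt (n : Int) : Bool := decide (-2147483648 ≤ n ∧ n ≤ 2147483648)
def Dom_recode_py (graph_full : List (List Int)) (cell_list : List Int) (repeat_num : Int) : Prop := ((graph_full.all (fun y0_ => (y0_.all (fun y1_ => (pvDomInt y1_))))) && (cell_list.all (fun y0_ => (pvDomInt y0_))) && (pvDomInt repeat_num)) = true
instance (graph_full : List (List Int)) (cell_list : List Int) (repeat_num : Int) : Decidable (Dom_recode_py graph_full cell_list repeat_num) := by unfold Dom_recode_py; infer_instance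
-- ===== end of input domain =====

-- B builds the replicated graph by divide-and-conquer doubling (recurse on repeat_num//2,
-- concatenate with a shifted copy of the half result) instead of A's linear offset-accumulator loop.

-- ===== PORT A =====
def recode_py (graph_full : List (List Int)) (cell_list : List Int) (repeat_num : Int) : List (List Int) × List Int :=
  let new_graph : List (List Int) := [] ++ graph_full
  let new_cell_list : List Int := [] ++ cell_list
  let st := (PySem.List.pyRange 0 (repeat_num - 1) 1).foldl
    (fun (st : List (List Int) × List Int × Int) _ =>
      let new_cell_list := st.2.1 ++ cell_list
      let add := st.2.2 + (graph_full.length : Int)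
      let new_graph := graph_full.foldl
        (fun g sub_list => g ++ [sub_list.map (fun x => x + add)]) st.1
      (new_graph, new_cell_list, add))
    (new_graph, new_cell_list, 0)
  (st.1, st.2.1)

-- ===== PORT B =====
def recode_py_alt (graph_full : List (List Int)) (cell_list : List Int) (repeat_num : Int) : List (List Int) × List Int :=
  if _h : repeat_num ≤ 1 then (graph_full, cell_list)
  else
    let half := recode_py_alt graph_full cell_list (PySem.Int.floordiv repeat_num 2)
    let offset : Int := (graph_full.length : Int) * PySem.Int.floordiv repeat_num 2
    let graph := half.1 ++ half.1.map (fun row => row.map (fun x => x + offset))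
    let cells := half.2 ++ half.2
    if PySem.Int.mod repeat_num 2 ≠ 0 then
      (graph ++ graph_full.map (fun row => row.map (fun x => x + (graph_full.length : Int) * (repeat_num - 1))),
       cells ++ cell_list)
    else (graph, cells)
termination_by repeat_num.toNat
decreasing_by
  rw [PySem.Int.floordiv_eq_ediv_of_pos (by norm_num : (0:Int) < 2)]
  omega

-- ===== PRECONDITION & SPEC =====
def Spec_recode_py (graph_full : List (List Int)) (cell_list : List Int) (repeat_num : Int) (out : List (List Int) × List Int) : Prop := out = recode_py_alt graph_full cell_list repeat_num
instance (graph_full : List (List Int)) (cell_list : List Int) (repeat_num : Int) (out : List (List Int) × List Int) : Decidable (Spec_recode_py graph_full cell_list repeat_num out) := by unfold Spec_recode_py; infer_instance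

-- ===== CLAIM =====
def Claim_equal_recode_py : Prop := ∀ (graph_full : List (List Int)) (cell_list : List Int) (repeat_num : Int), Dom_recode_py graph_full cell_list repeat_num → Spec_recode_py graph_full cell_list repeat_num (recode_py graph_full cell_list repeat_num)

-- ===== LEMMAS AND PROOFS =====

-- closed-form descriptions used only by the proofs
def cfG (g : List (List Int)) (k : Nat) : List (List Int) :=
  (List.range k).flatMap (fun r => g.map (fun row => row.map (fun x => x + (r : Int) * (g.length : Int))))

def cfC (c : List Int) (k : Nat) : List Int := (List.replicate k c).flatten

theorem cfG_one (g : List (List Int)) : cfG g 1 = g := by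
  simp [cfG]

theorem cfC_one (c : List Int) : cfC c 1 = c := by
  simp [cfC]

theorem cfG_add (g : List (List Int)) (a b : Nat) :
    cfG g (a + b) = cfG g a ++ (cfG g b).map (fun row => row.map (fun x => x + (a : Int) * (g.length : Int))) := by
  unfold cfG
  rw [List.range_add, List.flatMap_append, List.map_flatMap]
  congr 1
  rw [List.flatMap_map]
  congr 1
  funext r
  simp only [List.map_map, Function.comp_def]
  congr 1
  funext row
  congr 1
  funext x
  push_cast
  ring

theorem cfC_add (c : List Int) (a b : Nat) : cfC c (a + b) = cfC c a ++ cfC c b := by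
  unfold cfC
  rw [List.replicate_add, List.flatten_append]

theorem recode_loop (graph_full : List (List Int)) (cell_list : List Int) (k : Nat) :
    (PySem.List.pyRange 0 (k : Int) 1).foldl
      (fun (st : List (List Int) × List Int × Int) _ =>
        (graph_full.foldl
          (fun g sub_list => g ++ [sub_list.map (fun x => x + (st.2.2 + (graph_full.length : Int)))]) st.1,
         st.2.1 ++ cell_list,
         st.2.2 + (graph_full.length : Int)))
      (graph_full, cell_list, 0)
    = (cfG graph_full (k + 1), cfC cell_list (k + 1), (k : Int) * (graph_full.length : Int)) := by
  induction k with
  | zero =>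
      have h1 : PySem.List.pyRange 0 (0:Int) 1 = [] := PySem.List.pyRange_one_eq_nil (by norm_num)
      simp [h1, cfG_one, cfC_one]
  | succ k ih =>
      have hsplit : PySem.List.pyRange 0 ((k : Int) + 1) 1
          = PySem.List.pyRange 0 (k : Int) 1 ++ [(k : Int)] :=
        PySem.List.pyRange_one_succ_right (by positivity)
      push_cast
      rw [hsplit, List.foldl_append, ih]
      simp only [List.foldl_cons, List.foldl_nil, PySem.List.foldl_append_singleton_eq_map]
      refine Prod.ext ?_ (Prod.ext ?_ ?_)
      · have h2 : k + 1 + 1 = (k + 1) + 1 := rfl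
        rw [h2, cfG_add graph_full (k+1) 1, cfG_one]
        have h3 : (k : Int) * (graph_full.length : Int) + (graph_full.length : Int)
            = ((k : Nat) + 1 : Int) * (graph_full.length : Int) := by ring
        simp only [h3]
        push_cast
        rfl
      · have h2 : k + 1 + 1 = (k + 1) + 1 := rfl
        rw [h2, cfC_add cell_list (k+1) 1, cfC_one]
      · simp; ring

theorem alt_eq (graph_full : List (List Int)) (cell_list : List Int) :
    ∀ k : Nat, 1 ≤ k →
      recode_py_alt graph_full cell_list (k : Int) = (cfG graph_full k, cfC cell_list k) := by
  intro k
  induction k using Nat.strong_induction_on with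
  | _ k ih =>
    intro hk
    by_cases h1 : k = 1
    · subst h1
      rw [recode_py_alt]
      simp [cfG_one, cfC_one]
    · have hk2 : 2 ≤ k := by omega
      rw [recode_py_alt]
      have hcond : ¬ ((k : Int) ≤ 1) := by exact_mod_cast (by omega : ¬ ((k:Int) ≤ 1))
      rw [dif_neg hcond]
      have hfd : PySem.Int.floordiv (k : Int) 2 = ((k / 2 : Nat) : Int) := by
        exact_mod_cast PySem.Int.floordiv_natCast k 2
      have hmd : PySem.Int.mod (k : Int) 2 = ((k % 2 : Nat) : Int) := by
        exact_mod_cast PySem.Int.mod_natCast k 2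
      have hhalf : recode_py_alt graph_full cell_list ((k / 2 : Nat) : Int)
          = (cfG graph_full (k / 2), cfC cell_list (k / 2)) :=
        ih (k / 2) (by omega) (by omega)
      rw [hfd, hmd, hhalf]
      have hoff : (graph_full.length : Int) * ((k / 2 : Nat) : Int)
          = ((k / 2 : Nat) : Int) * (graph_full.length : Int) := by ring
      rw [hoff]
      set m := k / 2 with hm
      by_cases hpar : k % 2 = 0
      · have hne : ¬ (((k % 2 : Nat) : Int) ≠ 0) := by simp [hpar]
        rw [if_neg hne]
        have hsum : k = m + m := by omega
        rw [hsum, cfG_add, cfC_add]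
      · have hne : (((k % 2 : Nat) : Int) ≠ 0) := by
          simp only [ne_eq, Int.natCast_eq_zero]
          omega
        rw [if_pos hne]
        have hsum : k = (m + m) + 1 := by omega
        rw [hsum, cfG_add graph_full (m + m) 1, cfG_one,
            cfG_add graph_full m m, cfC_add cell_list (m + m) 1, cfC_one,
            cfC_add cell_list m m, List.append_assoc]
        refine Prod.ext ?_ rfl
        simp only [List.append_assoc]
        congr 3
        funext row
        congr 1
        funext x
        push_cast
        ring

theorem recode_py_spec : Claim_equal_recode_py := by
  intro graph_full cell_list repeat_num _
  unfold Spec_recode_py recode_py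
  simp only [List.nil_append]
  by_cases h : repeat_num ≤ 1
  · have h1 : PySem.List.pyRange 0 (repeat_num - 1) 1 = [] :=
      PySem.List.pyRange_one_eq_nil (by omega)
    rw [recode_py_alt, dif_pos h]
    simp [h1]
  · obtain ⟨k, hk⟩ : ∃ k : Nat, repeat_num = (k : Int) + 1 :=
      ⟨(repeat_num - 1).toNat, by omega⟩
    subst hk
    have h1 : (k : Int) + 1 - 1 = (k : Int) := by ring
    rw [h1, recode_loop]
    have h2 : ((k : Int) + 1) = (((k + 1 : Nat)) : Int) := by push_cast; ring
    rw [h2, alt_eq graph_full cell_list (k + 1) (by omega)]
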